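-- pv_equiv track=rewrite | github.com/Nghia03092004/nghia03092004.github.io | project_euler_unified/problem_513/solution.py | solve
-- ===== SOURCE A (Python) =====
-- import math
--
-- def solve(N: int):
--     """
--     Count triangles (a, b, c) with a <= b <= c <= N where
--     m_a = (1/2)*sqrt(2b^2 + 2c^2 - a^2) is a positive integer.
--
--     We need 2b^2 + 2c^2 - a^2 = 4*m^2 for some positive integer m.
--     Equivalently: 2b^2 + 2c^2 - a^2 must be a perfect square of an even number.
--     """
--     count = 0
--     for b in range(1, N + 1):
--         for c in range(b, N + 1):
--             val_base = 2 * b * b + 2 * c * c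
--             # a ranges from 1 to b, and triangle inequality: a + b > c => a > c - b
--             a_min = max(1, c - b + 1)
--             a_max = b
--             for a in range(a_min, a_max + 1):
--                 val = val_base - a * a
--                 if val <= 0:
--                     continue
--                 sq = math.isqrt(val)
--                 if sq * sq == val and sq % 2 == 0:
--                     count += 1
--     return count
-- ===== SOURCE B (Python) =====
-- import math
--
-- def solve(N: int):
--     count = 0
--     for k in range(1, N // 2 + 1):
--         a = 2 * k
--         for b in range(a, N + 1):
--             t = 2 * b * b - a * a
--             for c in range(b, min(a + b - 1, N) + 1, 2):
--                 val = t + 2 * c * c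
--                 sq = math.isqrt(val)
--                 if sq * sq == val:
--                     count += 1
--     return count
-- ===== Notes on version B (the rewrite author's own statement) =====
-- stated objective: alternative
-- what changed: B iterates only even medians' half-lengths (an integer median forces side a even), makes a the outermost loop variable, bounds c directly by the triangle inequality instead of recomputing a_min for every pair, and advances c in steps of two so that b+c stays even (otherwise the tested quantity is never an even square), so the isqrt square test runs on roughly a quarter of A's triples.
import Mathlib
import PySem

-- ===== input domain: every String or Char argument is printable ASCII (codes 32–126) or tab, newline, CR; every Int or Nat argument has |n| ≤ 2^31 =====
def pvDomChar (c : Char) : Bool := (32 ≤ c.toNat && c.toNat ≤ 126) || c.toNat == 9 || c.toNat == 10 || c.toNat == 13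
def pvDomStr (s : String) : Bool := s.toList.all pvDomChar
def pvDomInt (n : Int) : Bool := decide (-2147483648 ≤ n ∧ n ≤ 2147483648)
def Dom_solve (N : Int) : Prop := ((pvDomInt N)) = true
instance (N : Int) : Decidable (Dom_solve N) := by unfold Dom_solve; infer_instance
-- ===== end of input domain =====

-- B iterates only even a = 2k (an integer median forces a even), with a outermost, bounds c by
-- the triangle inequality c <= a+b-1 instead of re-deriving a_min per (b,c), and steps c by 2 so
-- that b + c stays even (2b^2+2c^2-a^2 is never an even square otherwise).

-- ===== PORT A =====
-- math.isqrt v, exact for v ≥ 0 (both programs only apply it to positive arguments)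
def pyIsqrt (v : Int) : Int := (Nat.sqrt v.toNat : Int)

def solve (N : Int) : Int :=
  (PySem.List.pyRange 1 (N + 1) 1).foldl (fun count b =>
    (PySem.List.pyRange b (N + 1) 1).foldl (fun count c =>
      let val_base := 2 * b * b + 2 * c * c
      let a_min := max 1 (c - b + 1)
      let a_max := b
      (PySem.List.pyRange a_min (a_max + 1) 1).foldl (fun count a =>
        let val := val_base - a * a
        if val ≤ 0 then count
        else
          let sq := pyIsqrt val
          if sq * sq = val ∧ PySem.Int.mod sq 2 = 0 then count + 1 else count)
        count) count) 0

-- ===== PORT B =====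
def solve_alt (N : Int) : Int :=
  (PySem.List.pyRange 1 (PySem.Int.floordiv N 2 + 1) 1).foldl (fun count k =>
    let a := 2 * k
    (PySem.List.pyRange a (N + 1) 1).foldl (fun count b =>
      let t := 2 * b * b - a * a
      (PySem.List.pyRange b (min (a + b - 1) N + 1) 2).foldl (fun count c =>
        let val := t + 2 * c * c
        let sq := pyIsqrt val
        if sq * sq = val then count + 1 else count) count) count) 0

-- ===== PRECONDITION & SPEC =====
def Spec_solve (N : Int) (out : Int) : Prop := out = solve_alt N
instance (N : Int) (out : Int) : Decidable (Spec_solve N out) := by unfold Spec_solve; infer_instance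

-- ===== CLAIM (what is proved, stated in full; the proofs are below) =====
def Claim_equal_solve : Prop := ∀ (N : Int), Dom_solve N → Spec_solve N (solve N)

-- ===== LEMMAS AND PROOFS =====

-- per-triple contribution of A's innermost loop body
def fA (a b c : Int) : Int :=
  if 2 * b * b + 2 * c * c - a * a ≤ 0 then 0
  else if pyIsqrt (2 * b * b + 2 * c * c - a * a) * pyIsqrt (2 * b * b + 2 * c * c - a * a)
            = 2 * b * b + 2 * c * c - a * a
          ∧ PySem.Int.mod (pyIsqrt (2 * b * b + 2 * c * c - a * a)) 2 = 0 then 1 else 0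

-- per-triple contribution of B's innermost loop body
def fB (a b c : Int) : Int :=
  if pyIsqrt (2 * b * b - a * a + 2 * c * c) * pyIsqrt (2 * b * b - a * a + 2 * c * c)
      = 2 * b * b - a * a + 2 * c * c then 1 else 0

theorem sum_map_pyRange (g : Int → Int) (a b : Int) :
    ((PySem.List.pyRange a b 1).map g).sum = ∑ x ∈ Finset.Ico a b, g x := by
  rcases le_or_gt b a with h | h
  · rw [PySem.List.pyRange_one_eq_nil h, Finset.Ico_eq_empty (by omega)]; simp
  · have hb : b = a + ((b - a).toNat : Int) := by omega
    rw [hb]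
    generalize (b - a).toNat = n
    induction n with
    | zero =>
      rw [PySem.List.pyRange_one_eq_nil (by omega), Finset.Ico_eq_empty (by omega)]; simp
    | succ m ih =>
      have h1 : a + ((m + 1 : Nat) : Int) = (a + m) + 1 := by push_cast; ring
      rw [h1, PySem.List.pyRange_one_succ_right (by omega),
        ← Finset.sum_Ico_add_eq_sum_Ico_add_one (by omega) g,
        List.map_append, List.sum_append, ih]
      simp

theorem sum_map_pyRange_two (g : Int → Int) (a b : Int) :
    ((PySem.List.pyRange a b 2).map g).sum
      = ∑ x ∈ Finset.Ico a b, if x % 2 = a % 2 then g x else 0 := by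
  rcases le_or_gt b a with h | h
  · rw [show PySem.List.pyRange a b 2 = [] from by
        rw [PySem.List.pyRange_of_pos a b (by norm_num), if_neg (by omega)]; rfl,
      Finset.Ico_eq_empty (by omega)]
    simp
  · have h0 : ((PySem.List.pyRange a b 2).map g).sum
        = ∑ k ∈ Finset.range ((b - a + 2 - 1) / 2).toNat, g (a + 2 * (k : Int)) := by
      rw [PySem.List.pyRange_of_pos a b (by norm_num), List.map_map, if_pos h]
      exact Eq.symm ((fun {a b} => Int.neg_inj.mp) rfl)
    rw [h0, ← Finset.sum_filter]
    refine Finset.sum_nbij' (i := fun k => a + 2 * (k : Int))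
      (j := fun x => ((x - a) / 2).toNat) ?_ ?_ ?_ ?_ ?_
    · intro k hk
      simp only [Finset.mem_range] at hk
      simp only [Finset.mem_filter, Finset.mem_Ico]
      omega
    · intro x hx
      simp only [Finset.mem_filter, Finset.mem_Ico] at hx
      simp only [Finset.mem_range]
      omega
    · intro k hk
      simp only [Finset.mem_range] at hk
      dsimp only
      omega
    · intro x hx
      simp only [Finset.mem_filter, Finset.mem_Ico] at hx
      dsimp only
      omega
    · intro k _
      rfl

theorem solveA_sum (N : Int) :
    solve N = ∑ b ∈ Finset.Ico 1 (N + 1), ∑ c ∈ Finset.Ico b (N + 1),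
      ∑ a ∈ Finset.Ico (max 1 (c - b + 1)) (b + 1), fA a b c := by
  have e : ∀ b c : Int, (fun (count a : Int) =>
      let val := 2 * b * b + 2 * c * c - a * a
      if val ≤ 0 then count
      else
        let sq := pyIsqrt val
        if sq * sq = val ∧ PySem.Int.mod sq 2 = 0 then count + 1 else count)
      = fun count a => count + fA a b c := by
    intro b c; funext count a
    simp only [fA]; split_ifs <;> ring
  unfold solve
  simp only [e, PySem.List.foldl_add, sum_map_pyRange, zero_add]

theorem solveB_sum (N : Int) :
    solve_alt N = ∑ k ∈ Finset.Ico 1 (N / 2 + 1), ∑ b ∈ Finset.Ico (2 * k) (N + 1),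
      ∑ c ∈ Finset.Ico b (min (2 * k + b - 1) N + 1),
        (if c % 2 = b % 2 then fB (2 * k) b c else 0) := by
  have e : ∀ k b : Int, (fun (count c : Int) =>
      let val := 2 * b * b - (2 * k) * (2 * k) + 2 * c * c
      let sq := pyIsqrt val
      if sq * sq = val then count + 1 else count)
      = fun count c => count + fB (2 * k) b c := by
    intro k b; funext count c
    simp only [fB]; split_ifs <;> ring
  unfold solve_alt
  rw [PySem.Int.floordiv_eq_ediv_of_pos (by norm_num)]
  simp only [e, PySem.List.foldl_add, sum_map_pyRange_two, sum_map_pyRange, zero_add]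

-- a sub-interval sum as a sum over a larger interval with an indicator
theorem sum_Ico_extend (g : Int → Int) {l u L U : Int} (hL : L ≤ l) (hU : u ≤ U) :
    ∑ x ∈ Finset.Ico l u, g x = ∑ x ∈ Finset.Ico L U, if l ≤ x ∧ x < u then g x else 0 := by
  rw [← Finset.sum_filter]
  congr 1
  ext x
  simp only [Finset.mem_Ico, Finset.mem_filter]
  omega

-- reindex k ↦ a = 2k : the sum over k = 1 .. N//2 is the sum over even a in 1 .. N
theorem sum_double (N : Int) (F : Int → Int) :
    ∑ k ∈ Finset.Ico 1 (N / 2 + 1), F (2 * k)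
      = ∑ a ∈ Finset.Ico 1 (N + 1), if a % 2 = 0 then F a else 0 := by
  rw [← Finset.sum_filter]
  refine Finset.sum_nbij' (i := fun k => 2 * k) (j := fun a => a / 2) ?_ ?_ ?_ ?_ ?_
  all_goals intro x hx
  all_goals simp_all only [Finset.mem_Ico, Finset.mem_filter]
  all_goals omega

-- pushing a finite sum out of an if-then-else with 0 in the else branch
theorem ite_sum_zero (P : Prop) [Decidable P] (s : Finset Int) (f : Int → Int) :
    (if P then ∑ x ∈ s, f x else 0) = ∑ x ∈ s, if P then f x else 0 := by
  split_ifs <;> simp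

theorem even_sq_iff (b : Int) : Even (b * b) ↔ Even b := by
  simp [Int.even_mul]

-- even a, inside the triangle region: A's body and B's body agree
theorem fA_eq_fB {a b c : Int} (h1 : 1 ≤ a) (h2 : a ≤ b) (h3 : b ≤ c)
    (hpar : a % 2 = 0) : fA a b c = if c % 2 = b % 2 then fB a b c else 0 := by
  have hc1 : 1 ≤ c := le_trans (le_trans h1 h2) h3
  have hv : 2 * b * b - a * a + 2 * c * c = 2 * b * b + 2 * c * c - a * a := by ring
  unfold fA fB
  rw [hv]
  have hpos : ¬ (2 * b * b + 2 * c * c - a * a ≤ 0) := by nlinarith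
  rw [if_neg hpos]
  obtain ⟨a', ha'⟩ : 2 ∣ a := Int.dvd_of_emod_eq_zero hpar
  subst ha'
  generalize pyIsqrt (2 * b * b + 2 * c * c - 2 * a' * (2 * a')) = s
  by_cases hsq : s * s = 2 * b * b + 2 * c * c - 2 * a' * (2 * a')
  · have hevenv : Even (2 * b * b + 2 * c * c - 2 * a' * (2 * a')) :=
      ⟨b * b + c * c - 2 * a' * a', by ring⟩
    have hsev : Even s := by
      rcases Int.even_mul.mp (hsq ▸ hevenv) with h | h <;> exact h
    obtain ⟨t, ht⟩ := hsev
    subst ht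
    have h2 : 2 * (b * b + c * c) = 2 * ((t * t + a' * a') + (t * t + a' * a')) := by
      linear_combination -hsq
    have hbc : Even (b * b + c * c) := ⟨t * t + a' * a', mul_left_cancel₀ two_ne_zero h2⟩
    have hbceven : Even (b + c) := by
      rw [Int.even_add] at hbc ⊢
      rw [even_sq_iff, even_sq_iff] at hbc
      exact hbc
    have hpb : c % 2 = b % 2 := by
      have := Int.even_iff.mp hbceven
      omega
    rw [if_pos ⟨hsq, (PySem.Int.mod_eq_zero_iff_dvd _ _).mpr ⟨t, by ring⟩⟩,
        if_pos hpb, if_pos hsq]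
  · rw [if_neg fun h => hsq h.1]
    split_ifs <;> rfl

-- odd a: A's even-square test can never succeed
theorem fA_odd {a b c : Int} (h1 : 1 ≤ a) (h2 : a ≤ b) (h3 : b ≤ c)
    (hpar : ¬ a % 2 = 0) : fA a b c = 0 := by
  have hc1 : 1 ≤ c := le_trans (le_trans h1 h2) h3
  unfold fA
  have hpos : ¬ (2 * b * b + 2 * c * c - a * a ≤ 0) := by nlinarith
  rw [if_neg hpos]
  obtain ⟨a', ha'⟩ : ∃ a', a = 2 * a' + 1 := ⟨a / 2, by omega⟩
  subst ha'
  generalize pyIsqrt (2 * b * b + 2 * c * c - (2 * a' + 1) * (2 * a' + 1)) = s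
  rw [if_neg]
  rintro ⟨hsq, hm⟩
  obtain ⟨t, ht⟩ := (PySem.Int.mod_eq_zero_iff_dvd _ _).mp hm
  subst ht
  have heven : Even (2 * t * (2 * t)) := ⟨t * (2 * t), by ring⟩
  rw [hsq] at heven
  have hodd : Odd (2 * b * b + 2 * c * c - (2 * a' + 1) * (2 * a' + 1)) :=
    ⟨b * b + c * c - 2 * a' * a' - 2 * a' - 1, by ring⟩
  have he := Int.even_iff.mp heven
  have ho := Int.odd_iff.mp hodd
  omega

-- the pointwise identity over the cube 1 ≤ a, b, c ≤ N
theorem core (N a b c : Int) (ha : 1 ≤ a ∧ a < N + 1) (hb : 1 ≤ b ∧ b < N + 1)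
    (hc : 1 ≤ c ∧ c < N + 1) :
    (if b ≤ c ∧ c < N + 1 then (if max 1 (c - b + 1) ≤ a ∧ a < b + 1 then fA a b c else 0) else 0)
      = if a % 2 = 0 then
          (if a ≤ b ∧ b < N + 1 then
            (if b ≤ c ∧ c < min (a + b - 1) N + 1 then
              (if c % 2 = b % 2 then fB a b c else 0) else 0) else 0)
        else 0 := by
  by_cases hreg : a ≤ b ∧ b ≤ c ∧ c < a + b
  · rw [if_pos (by omega), if_pos (by constructor <;> omega)]
    by_cases hpar : a % 2 = 0
    · rw [if_pos hpar, if_pos (by omega), if_pos (by omega)]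
      exact fA_eq_fB (by omega) (by omega) (by omega) hpar
    · rw [if_neg hpar]
      exact fA_odd (by omega) (by omega) (by omega) hpar
  · split_ifs <;> first | rfl | omega

theorem solve_eq (N : Int) : solve N = solve_alt N := by
  rw [solveA_sum, solveB_sum]
  calc ∑ b ∈ Finset.Ico 1 (N + 1), ∑ c ∈ Finset.Ico b (N + 1),
        ∑ a ∈ Finset.Ico (max 1 (c - b + 1)) (b + 1), fA a b c
      = ∑ b ∈ Finset.Ico 1 (N + 1), ∑ c ∈ Finset.Ico 1 (N + 1),
          if b ≤ c ∧ c < N + 1 then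
            (∑ a ∈ Finset.Ico 1 (N + 1), if max 1 (c - b + 1) ≤ a ∧ a < b + 1
              then fA a b c else 0) else 0 := by
        refine Finset.sum_congr rfl fun b hb => ?_
        simp only [Finset.mem_Ico] at hb
        exact (Finset.sum_congr rfl fun c hc =>
            sum_Ico_extend (fun a => fA a b c) (le_max_left 1 _) (by omega)).trans
          (sum_Ico_extend _ (by omega) le_rfl)
    _ = ∑ b ∈ Finset.Ico 1 (N + 1), ∑ c ∈ Finset.Ico 1 (N + 1), ∑ a ∈ Finset.Ico 1 (N + 1),
          (if b ≤ c ∧ c < N + 1 then (if max 1 (c - b + 1) ≤ a ∧ a < b + 1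
            then fA a b c else 0) else 0) := by
        simp only [ite_sum_zero]
    _ = ∑ b ∈ Finset.Ico 1 (N + 1), ∑ c ∈ Finset.Ico 1 (N + 1), ∑ a ∈ Finset.Ico 1 (N + 1),
          (if a % 2 = 0 then
            (if a ≤ b ∧ b < N + 1 then
              (if b ≤ c ∧ c < min (a + b - 1) N + 1 then
                (if c % 2 = b % 2 then fB a b c else 0) else 0) else 0)
          else 0) := by
        refine Finset.sum_congr rfl fun b hb => Finset.sum_congr rfl fun c hc =>
          Finset.sum_congr rfl fun a ha => ?_
        simp only [Finset.mem_Ico] at ha hb hc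
        exact core N a b c ha hb hc
    _ = ∑ a ∈ Finset.Ico 1 (N + 1), ∑ b ∈ Finset.Ico 1 (N + 1), ∑ c ∈ Finset.Ico 1 (N + 1),
          (if a % 2 = 0 then
            (if a ≤ b ∧ b < N + 1 then
              (if b ≤ c ∧ c < min (a + b - 1) N + 1 then
                (if c % 2 = b % 2 then fB a b c else 0) else 0) else 0)
          else 0) := by
        exact (Finset.sum_congr rfl fun b _ => Finset.sum_comm).trans Finset.sum_comm
    _ = ∑ a ∈ Finset.Ico 1 (N + 1), if a % 2 = 0 then
          (∑ b ∈ Finset.Ico 1 (N + 1), if a ≤ b ∧ b < N + 1 then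
            (∑ c ∈ Finset.Ico 1 (N + 1), if b ≤ c ∧ c < min (a + b - 1) N + 1
              then (if c % 2 = b % 2 then fB a b c else 0) else 0) else 0) else 0 := by
        simp only [ite_sum_zero]
    _ = ∑ k ∈ Finset.Ico 1 (N / 2 + 1),
          ∑ b ∈ Finset.Ico 1 (N + 1), if 2 * k ≤ b ∧ b < N + 1 then
            (∑ c ∈ Finset.Ico 1 (N + 1), if b ≤ c ∧ c < min (2 * k + b - 1) N + 1
              then (if c % 2 = b % 2 then fB (2 * k) b c else 0) else 0) else 0 := by
        exact (sum_double N (fun a => ∑ b ∈ Finset.Ico 1 (N + 1),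
          if a ≤ b ∧ b < N + 1 then
            (∑ c ∈ Finset.Ico 1 (N + 1), if b ≤ c ∧ c < min (a + b - 1) N + 1
              then (if c % 2 = b % 2 then fB a b c else 0) else 0) else 0)).symm
    _ = ∑ k ∈ Finset.Ico 1 (N / 2 + 1), ∑ b ∈ Finset.Ico (2 * k) (N + 1),
          ∑ c ∈ Finset.Ico b (min (2 * k + b - 1) N + 1),
            (if c % 2 = b % 2 then fB (2 * k) b c else 0) := by
        refine Finset.sum_congr rfl fun k hk => ?_
        simp only [Finset.mem_Ico] at hk
        refine ((sum_Ico_extend (fun b => ∑ c ∈ Finset.Ico b (min (2 * k + b - 1) N + 1),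
            (if c % 2 = b % 2 then fB (2 * k) b c else 0))
            (by omega : (1:Int) ≤ 2 * k) le_rfl).trans ?_).symm
        refine Finset.sum_congr rfl fun b hb => ?_
        simp only [Finset.mem_Ico] at hb
        by_cases h : 2 * k ≤ b ∧ b < N + 1
        · rw [if_pos h, if_pos h]
          exact sum_Ico_extend _ (by omega) (by omega)
        · rw [if_neg h, if_neg h]

-- ===== VERDICT (by name: the statement is the Claim_ definition above) =====
theorem solve_spec : Claim_equal_solve := by
  intro N _
  unfold Spec_solve
  exact solve_eq N
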